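-- pv_equiv track=rewrite | github.com/suparklingmin/lecture | 2018/LC/codes/decision_tree.py | sent_segment
-- ===== SOURCE A (Python) =====
-- abbre = ['Dr.', 'Mr.', 'Ms.']
--
-- def iseos(word:str):
--     if word.endswith(tuple('?!:')):
--         return True
--     if not word.endswith('.'):
--         return False
--     return word not in abbre
--
-- def eoslist(words:list):
--     return [iseos(word) for word in words]
--
-- def sent_segment(words:list):
--     # indices of eos
--     eos_ind = [i for i, iseos in enumerate(eoslist(words)) if iseos]
--     # stop condition
--     if len(eos_ind) <= 1:
--         return [' '.join(words)]
--     # recursion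
--     for i in eos_ind:
--         sent = ' '.join(words[:i+1])
--         remainder = words[i+1:]
--         return [sent] + sent_segment(remainder)
-- ===== SOURCE B (Python) =====
-- abbre = ['Dr.', 'Mr.', 'Ms.']
--
-- def iseos(word:str):
--     return word.endswith(('?', '!', ':')) or (word.endswith('.') and word not in abbre)
--
-- def sent_segment(words:list):
--     # one pass: find all end-of-sentence indices once, then slice at every eos but the last
--     eos = [i for i, w in enumerate(words) if iseos(w)]
--     if len(eos) <= 1:
--         return [' '.join(words)]
--     cuts = [i + 1 for i in eos[:-1]]
--     return [' '.join(words[s:e]) for s, e in zip([0] + cuts, cuts + [len(words)])]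
-- ===== Notes on version B (the rewrite author's own statement) =====
-- stated objective: alternative
-- what changed: A re-scans the whole remainder (rebuilding the eos list) at every recursion step; B computes the eos indices once in a single pass and slices the word list at every eos boundary except the last with one zip over the boundaries, with no recursion.
import Mathlib
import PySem

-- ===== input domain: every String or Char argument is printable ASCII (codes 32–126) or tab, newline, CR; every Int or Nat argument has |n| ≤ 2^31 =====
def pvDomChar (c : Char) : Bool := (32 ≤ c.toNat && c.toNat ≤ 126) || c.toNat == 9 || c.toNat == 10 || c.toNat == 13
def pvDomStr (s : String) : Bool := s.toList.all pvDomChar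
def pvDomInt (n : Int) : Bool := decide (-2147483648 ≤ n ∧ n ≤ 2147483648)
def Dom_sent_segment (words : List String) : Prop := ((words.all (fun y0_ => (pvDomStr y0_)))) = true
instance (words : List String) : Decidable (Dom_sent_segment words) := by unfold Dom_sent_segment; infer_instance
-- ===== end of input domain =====

-- B replaces A's re-scanning recursion by a single pass: eos indices computed once, one slice per boundary.
-- ===== PORT A =====
def abbreA : List String := ["Dr.", "Mr.", "Ms."]

def iseosA (word : String) : Bool :=
  if PySem.Str.endswith word "?" || PySem.Str.endswith word "!" || PySem.Str.endswith word ":" then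
    true
  else if !PySem.Str.endswith word "." then
    false
  else
    !(abbreA.contains word)

def eoslistA (words : List String) : List Bool :=
  words.map iseosA

def eosIndA (words : List String) : List Int :=
  ((PySem.List.enumerate (eoslistA words) 0).filter (fun p => p.2)).map (fun p => p.1)

-- termination helper for the port's recursion (cited in decreasing_by)
theorem eosIndA_mem_bounds (words : List String) (i : Int) (h : i ∈ eosIndA words) :
    0 ≤ i ∧ i < (words.length : Int) := by
  unfold eosIndA at h
  simp only [List.mem_map, List.mem_filter] at h
  obtain ⟨p, ⟨hp, _⟩, rfl⟩ := h
  rw [PySem.List.mem_enumerate_iff] at hp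
  obtain ⟨k, hk, rfl⟩ := hp
  simp only [eoslistA, List.length_map] at hk
  constructor <;> [omega; exact_mod_cast by omega]

def sent_segment (words : List String) : List String :=
  if (eosIndA words).length ≤ 1 then
    [PySem.Str.join " " words]
  else
    match h : eosIndA words with
    | [] => []   -- unreachable: the guard gives the list length ≥ 2
    | i :: _ =>
      PySem.Str.join " " (PySem.List.slice words none (some (i + 1))) ::
        sent_segment (PySem.List.slice words (some (i + 1)) none)
termination_by words.length
decreasing_by
  have hb := eosIndA_mem_bounds words i (by rw [h]; exact List.mem_cons_self)
  rw [PySem.List.slice_from words (show (0:Int) ≤ i + 1 by omega)]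
  simp only [List.length_drop]
  omega

-- ===== PORT B =====
def iseosB (word : String) : Bool :=
  (PySem.Str.endswith word "?" || PySem.Str.endswith word "!" || PySem.Str.endswith word ":") ||
  (PySem.Str.endswith word "." && !(abbreA.contains word))

def sent_segment_alt (words : List String) : List String :=
  let eos := ((PySem.List.enumerate words 0).filter (fun p => iseosB p.2)).map (fun p => p.1)
  if eos.length ≤ 1 then
    [PySem.Str.join " " words]
  else
    let cuts := (PySem.List.slice eos none (some (-1))).map (· + 1)
    ((0 :: cuts).zip (cuts ++ [(words.length : Int)])).map
      (fun p => PySem.Str.join " " (PySem.List.slice words (some p.1) (some p.2)))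

-- ===== PRECONDITION & SPEC =====
def Spec_sent_segment (words : List String) (out : List String) : Prop := out = sent_segment_alt words
instance (words : List String) (out : List String) : Decidable (Spec_sent_segment words out) := by unfold Spec_sent_segment; infer_instance

-- ===== CLAIM (what is proved, stated in full; the proofs are below) =====
def Claim_equal_sent_segment : Prop := ∀ (words : List String), Dom_sent_segment words → Spec_sent_segment words (sent_segment words)

-- ===== LEMMAS AND PROOFS =====

-- eos-index function common to both proofs (proof-only helper)
def eosF (s : Int) (ws : List String) : List Int :=
  ((PySem.List.enumerate ws s).filter (fun p => iseosB p.2)).map (fun p => p.1)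

theorem iseos_eq (w : String) : iseosA w = iseosB w := by
  unfold iseosA iseosB
  split_ifs <;> simp_all

theorem eosF_cons (s : Int) (w : String) (t : List String) :
    eosF s (w :: t) = (if iseosB w then [s] else []) ++ eosF (s + 1) t := by
  unfold eosF
  rw [PySem.List.enumerate_cons]
  by_cases h : iseosB w <;> simp [h]

theorem eosIndA_eq_aux (ws : List String) : ∀ s,
    ((PySem.List.enumerate (eoslistA ws) s).filter (fun p => p.2)).map (fun p => p.1) = eosF s ws := by
  induction ws with
  | nil => intro s; rfl
  | cons w t ih =>
    intro s
    have : eoslistA (w :: t) = iseosA w :: eoslistA t := rfl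
    rw [this, PySem.List.enumerate_cons, eosF_cons]
    by_cases h : iseosB w <;>
      simp [iseos_eq, h, ih (s + 1)]

theorem eosIndA_eq (ws : List String) : eosIndA ws = eosF 0 ws := eosIndA_eq_aux ws 0

theorem eosF_shift (ws : List String) : ∀ s, eosF s ws = (eosF 0 ws).map (· + s) := by
  induction ws with
  | nil => intro s; rfl
  | cons w t ih =>
    intro s
    rw [eosF_cons, eosF_cons, ih (s + 1), ih (0 + 1)]
    by_cases h : iseosB w <;>
      simp [h, List.map_map] <;>
      · intro a _; ring

theorem eosF_append (s : Int) (a b : List String) :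
    eosF s (a ++ b) = eosF s a ++ eosF (s + a.length) b := by
  unfold eosF
  rw [PySem.List.enumerate_append]
  simp [List.filter_append]

theorem eosF_bounds (ws : List String) (i : Int) (h : i ∈ eosF 0 ws) :
    0 ≤ i ∧ i < (ws.length : Int) := by
  unfold eosF at h
  simp only [List.mem_map, List.mem_filter] at h
  obtain ⟨p, ⟨hp, _⟩, rfl⟩ := h
  rw [PySem.List.mem_enumerate_iff] at hp
  obtain ⟨k, hk, rfl⟩ := hp
  constructor <;> [omega; exact_mod_cast by omega]

theorem eosF_pairwise (ws : List String) : (eosF 0 ws).Pairwise (· < ·) := by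
  unfold eosF
  refine List.Pairwise.map _ (fun a b hab => hab) ?_
  exact (PySem.List.pairwise_lt_enumerate ws 0).filter _

theorem eos_split (ws : List String) (i : Int) (rest : List Int)
    (h : eosF 0 ws = i :: rest) :
    eosF 0 (ws.take (i + 1).toNat) = [i] ∧
    rest = (eosF 0 (ws.drop (i + 1).toNat)).map (· + (i + 1)) := by
  obtain ⟨hi0, hilen⟩ := eosF_bounds ws i (by rw [h]; exact List.mem_cons_self)
  have hnlen : (i + 1).toNat ≤ ws.length := by omega
  have htklen : ((ws.take (i + 1).toNat).length : Int) = i + 1 := by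
    simp [List.length_take]; omega
  have hsplit : eosF 0 ws =
      eosF 0 (ws.take (i + 1).toNat) ++ (eosF 0 (ws.drop (i + 1).toNat)).map (· + (i + 1)) := by
    have h2 := eosF_append 0 (ws.take (i + 1).toNat) (ws.drop (i + 1).toNat)
    rw [List.take_append_drop] at h2
    rw [show (0 : Int) + ((ws.take (i + 1).toNat).length : Int) = i + 1 by omega] at h2
    rw [h2, eosF_shift (List.drop (i + 1).toNat ws) (i + 1)]
  have hA : ∀ x ∈ eosF 0 (ws.take (i + 1).toNat), x ≤ i := by
    intro x hx
    have := (eosF_bounds _ x hx).2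
    omega
  have hB : ∀ x ∈ (eosF 0 (ws.drop (i + 1).toNat)).map (· + (i + 1)), i + 1 ≤ x := by
    intro x hx
    simp only [List.mem_map] at hx
    obtain ⟨y, hy, rfl⟩ := hx
    have := (eosF_bounds _ y hy).1
    omega
  have hp : ∀ y ∈ rest, i < y := by
    have := eosF_pairwise ws
    rw [h] at this
    exact (List.pairwise_cons.mp this).1
  rw [h] at hsplit
  cases hA' : eosF 0 (ws.take (i + 1).toNat) with
  | nil =>
    rw [hA'] at hsplit
    simp only [List.nil_append] at hsplit
    have : i ∈ (eosF 0 (ws.drop (i + 1).toNat)).map (· + (i + 1)) := by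
      rw [← hsplit]; exact List.mem_cons_self
    have := hB i this
    omega
  | cons x ys =>
    rw [hA'] at hsplit
    simp only [List.cons_append, List.cons.injEq] at hsplit
    obtain ⟨rfl, hrest⟩ := hsplit
    cases ys with
    | nil => exact ⟨rfl, by simpa using hrest⟩
    | cons y zs =>
      have hy1 : y ≤ i := hA y (by rw [hA']; exact List.mem_cons_of_mem _ List.mem_cons_self)
      have hy2 : i < y := hp y (by rw [hrest]; exact List.mem_cons_self)
      omega

def cutsOf (ws : List String) : List Int :=
  (PySem.List.slice (eosF 0 ws) none (some (-1))).map (· + 1)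

def segsB (ws : List String) : List String :=
  ((0 :: cutsOf ws).zip (cutsOf ws ++ [(ws.length : Int)])).map
    (fun p => PySem.Str.join " " (PySem.List.slice ws (some p.1) (some p.2)))

theorem alt_eq (ws : List String) :
    sent_segment_alt ws =
      if (eosF 0 ws).length ≤ 1 then [PySem.Str.join " " ws] else segsB ws := rfl

theorem cutsOf_eq (ws : List String) : cutsOf ws = (eosF 0 ws).dropLast.map (· + 1) := by
  unfold cutsOf
  rw [PySem.List.slice_to_neg_one]

theorem alt_small (ws : List String) (h : (eosF 0 ws).length ≤ 1) :
    sent_segment_alt ws = [PySem.Str.join " " ws] := by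
  rw [alt_eq, if_pos h]

theorem slice_shift (ws : List String) (n : Nat) (s e : Int) (hs : 0 ≤ s) (he : 0 ≤ e) :
    PySem.List.slice ws (some (s + (n : Int))) (some (e + (n : Int))) =
      PySem.List.slice (ws.drop n) (some s) (some e) := by
  rw [PySem.List.slice_toNat ws (by omega) (by omega), PySem.List.slice_toNat _ hs he]
  rw [List.drop_drop, show (s + (n : Int)).toNat = n + s.toNat by omega]
  congr 1
  omega

theorem cutsOf_nonneg (ws : List String) (x : Int) (hx : x ∈ cutsOf ws) : 0 ≤ x := by
  rw [cutsOf_eq] at hx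
  simp only [List.mem_map] at hx
  obtain ⟨y, hy, rfl⟩ := hx
  have := (eosF_bounds ws y ((List.dropLast_sublist _).subset hy)).1
  omega

theorem alt_cons (ws : List String) (i : Int) (rest : List Int)
    (h : eosF 0 ws = i :: rest) (hrest : rest ≠ []) :
    sent_segment_alt ws =
      PySem.Str.join " " (ws.take (i + 1).toNat) ::
        sent_segment_alt (ws.drop (i + 1).toNat) := by
  obtain ⟨hi0, hilen⟩ := eosF_bounds ws i (by rw [h]; exact List.mem_cons_self)
  obtain ⟨-, hsh⟩ := eos_split ws i rest h
  have hsn : (((i + 1).toNat : Nat) : Int) = i + 1 := by omega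
  have hblen : (((ws.drop (i + 1).toNat).length : Nat) : Int) = (ws.length : Int) - (i + 1) := by
    simp [List.length_drop]; omega
  have hEne : eosF 0 (ws.drop (i + 1).toNat) ≠ [] := by
    intro h0; rw [h0] at hsh; simp at hsh; exact hrest hsh
  have hcuts : cutsOf ws = (i + 1) :: (cutsOf (ws.drop (i + 1).toNat)).map (· + (i + 1)) := by
    rw [cutsOf_eq, cutsOf_eq, h, hsh]
    rw [List.dropLast_cons_of_ne_nil (by intro h0; rw [h0] at hsh; exact hrest (by simp [hsh]))]
    rw [← List.map_dropLast]
    simp only [List.map_cons, List.map_map]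
    congr 1
    apply List.map_congr_left
    intro a _
    simp [Function.comp]; ring
  have hwslen : ¬ (eosF 0 ws).length ≤ 1 := by
    rw [h]
    have := List.length_pos_of_ne_nil hrest
    simp [List.length_cons]; omega
  rw [alt_eq ws, if_neg hwslen, alt_eq (ws.drop (i + 1).toNat)]
  have hhead : PySem.List.slice ws (some 0) (some (i + 1)) = ws.take (i + 1).toNat := by
    rw [PySem.List.slice_toNat ws le_rfl (by omega)]
    simp
  by_cases hsb : (eosF 0 (ws.drop (i + 1).toNat)).length ≤ 1
  · obtain ⟨e, hE⟩ : ∃ e, eosF 0 (ws.drop (i + 1).toNat) = [e] := by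
      cases hEc : eosF 0 (ws.drop (i + 1).toNat) with
      | nil => exact absurd hEc hEne
      | cons e t =>
        cases t with
        | nil => exact ⟨e, rfl⟩
        | cons a b => rw [hEc] at hsb; simp at hsb
    rw [if_pos hsb]
    have hcb : cutsOf (ws.drop (i + 1).toNat) = [] := by rw [cutsOf_eq, hE]; rfl
    unfold segsB
    rw [hcuts, hcb]
    have hlast : PySem.List.slice ws (some (i + 1)) (some (ws.length : Int)) =
        ws.drop (i + 1).toNat := by
      rw [PySem.List.slice_toNat ws (by omega) (by omega)]
      apply List.take_of_length_le
      simp only [List.length_drop]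
      omega
    simp only [List.map_nil, List.nil_append, List.cons_append,
      List.zip_cons_cons, List.zip_nil_right, List.map_cons, List.map_nil]
    rw [hhead, hlast]
  · rw [if_neg hsb]
    unfold segsB
    rw [hcuts]
    simp only [List.cons_append, List.zip_cons_cons, List.map_cons]
    congr 1
    · rw [hhead]
    have h1 : (i + 1) :: (cutsOf (ws.drop (i + 1).toNat)).map (· + (i + 1)) =
        (0 :: cutsOf (ws.drop (i + 1).toNat)).map (· + (i + 1)) := by simp
    have h2 : (cutsOf (ws.drop (i + 1).toNat)).map (· + (i + 1)) ++ [(ws.length : Int)] =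
        (cutsOf (ws.drop (i + 1).toNat) ++ [((ws.drop (i + 1).toNat).length : Int)]).map (· + (i + 1)) := by
      simp only [List.map_append, List.map_cons, List.map_nil]
      congr 2
      omega
    rw [h1, h2, List.zip_map, List.map_map]
    apply List.map_congr_left
    intro p hp
    obtain ⟨hp1, hp2⟩ := List.of_mem_zip (by exact hp)
    have h0p1 : 0 ≤ p.1 := by
      rcases List.mem_cons.mp hp1 with h' | h'
      · omega
      · exact cutsOf_nonneg _ _ h'
    have h0p2 : 0 ≤ p.2 := by
      rcases List.mem_append.mp hp2 with h' | h'
      · exact cutsOf_nonneg _ _ h'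
      · simp at h'; omega
    simp only [Function.comp, Prod.map]
    congr 1
    rw [← hsn]
    exact slice_shift ws (i + 1).toNat p.1 p.2 h0p1 h0p2

theorem sent_segment_main : ∀ (words : List String), sent_segment words = sent_segment_alt words := by
  suffices key : ∀ (N : Nat) (ws : List String), ws.length ≤ N →
      sent_segment ws = sent_segment_alt ws by
    intro ws; exact key ws.length ws le_rfl
  intro N
  induction N with
  | zero =>
    intro ws hlen
    have : ws = [] := List.eq_nil_of_length_eq_zero (by omega)
    subst this
    rw [sent_segment, if_pos (by decide)]
    exact (alt_small [] (by decide)).symm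
  | succ N ih =>
    intro ws hlen
    rw [sent_segment.eq_def]
    by_cases hsmall : (eosIndA ws).length ≤ 1
    · rw [if_pos hsmall]
      exact (alt_small ws (by rw [← eosIndA_eq]; exact hsmall)).symm
    · rw [if_neg hsmall]
      split
      case _ hE => rw [hE] at hsmall; simp at hsmall
      case _ i rest hE =>
        have h0 : eosF 0 ws = i :: rest := by rw [← eosIndA_eq, hE]
        obtain ⟨hi0, hilen⟩ := eosF_bounds ws i (by rw [h0]; exact List.mem_cons_self)
        have hrest : rest ≠ [] := by
          intro hr; rw [hE, hr] at hsmall; simp at hsmall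
        rw [PySem.List.slice_to ws (by omega), PySem.List.slice_from ws (by omega)]
        rw [alt_cons ws i rest h0 hrest]
        congr 1
        apply ih
        simp only [List.length_drop]
        omega

-- ===== VERDICT (by name: the statement is the Claim_ definition above) =====
theorem sent_segment_spec : Claim_equal_sent_segment := by
  intro words _
  exact sent_segment_main words
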